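-- pv_equiv track=rewrite | github.com/leshchenko1979/ai_sales | sales_bot/core/ai/gpt.py | _parse_advisor_response
-- ===== SOURCE A (Python) =====
-- from typing import List, Optional, Tuple
--
-- def _parse_advisor_response(response: str) -> Tuple[str, int, str, str, int]:
--     """Parse advisor response into components."""
--     status = "IN_PROGRESS"
--     warmth = 3
--     stage = 0
--     reason = ""
--     advice = ""
--
--     for line in response.strip().split("\n"):
--         line = line.strip()
--         if line.startswith("STATUS:"):
--             status = line.split(":", 1)[1].strip()
--         elif line.startswith("WARMTH:"):
--             try:
--                 warmth = int(line.split(":", 1)[1].strip())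
--             except ValueError:
--                 warmth = 3
--         elif line.startswith("STAGE:"):
--             try:
--                 stage = int(line.split(":", 1)[1].strip())
--             except ValueError:
--                 stage = 0
--         elif line.startswith("REASON:"):
--             reason = line.split(":", 1)[1].strip()
--         elif line.startswith("ADVICE:"):
--             advice = line.split(":", 1)[1].strip()
--
--     return status, warmth, reason, advice, stage
-- ===== SOURCE B (Python) =====
-- def _parse_advisor_response(response: str):
--     """Parse advisor response: each field independently takes the value of the
--     LAST line carrying its key (scanning back-to-front), with its default."""
--     lines = [ln.strip() for ln in response.strip().split("\n")]
--
--     def last_value(key):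
--         prefix = key + ":"
--         for line in reversed(lines):
--             if line.startswith(prefix):
--                 return line.split(":", 1)[1].strip()
--         return None
--
--     def last_int(key, default):
--         v = last_value(key)
--         if v is None:
--             return default
--         try:
--             return int(v)
--         except ValueError:
--             return default
--
--     status = last_value("STATUS")
--     reason = last_value("REASON")
--     advice = last_value("ADVICE")
--     return (
--         status if status is not None else "IN_PROGRESS",
--         last_int("WARMTH", 3),
--         reason if reason is not None else "",
--         advice if advice is not None else "",
--         last_int("STAGE", 0),
--     )
-- ===== Notes on version B (the rewrite author's own statement) =====
-- stated objective: alternative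
-- what changed: Instead of one forward pass accumulating five fields through an if/elif chain, B computes each field independently by scanning the stripped lines back-to-front for the last line carrying that field's key (first match in reversed order), so no mutable five-field state is threaded through a loop.
import Mathlib
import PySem

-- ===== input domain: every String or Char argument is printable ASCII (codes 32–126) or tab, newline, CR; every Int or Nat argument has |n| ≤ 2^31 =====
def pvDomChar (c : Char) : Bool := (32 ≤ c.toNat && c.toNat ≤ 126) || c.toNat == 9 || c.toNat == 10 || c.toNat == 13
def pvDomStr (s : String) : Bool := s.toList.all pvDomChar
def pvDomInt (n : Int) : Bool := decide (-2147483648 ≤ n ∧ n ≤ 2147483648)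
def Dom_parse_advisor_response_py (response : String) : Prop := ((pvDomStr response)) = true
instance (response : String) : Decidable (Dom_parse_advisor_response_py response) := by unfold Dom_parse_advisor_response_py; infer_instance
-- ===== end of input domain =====

-- B computes each of the five fields independently by a back-to-front scan for the last line with that field's key, instead of A's single forward pass threading a five-field state through an if/elif chain (alternative decomposition; same cost).


-- ===== PORT A =====
-- state = (status, warmth, stage, reason, advice), strings as List Char; one step = one loop iteration of A
def pvStepA (st : List Char × Int × Int × List Char × List Char) (rawLine : List Char) :
    List Char × Int × Int × List Char × List Char :=
  match st with
  | (status, warmth, stage, reason, advice) =>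
    let line := PySem.Chars.strip rawLine
    if PySem.Chars.startswith line ("STATUS:".toList) then
      (PySem.Chars.strip ((PySem.Chars.splitOnMax line [':'] 1).getD 1 []), warmth, stage, reason, advice)
    else if PySem.Chars.startswith line ("WARMTH:".toList) then
      -- try: warmth = int(...) ; except ValueError: warmth = 3
      (status, (PySem.Int.ofChars? (PySem.Chars.strip ((PySem.Chars.splitOnMax line [':'] 1).getD 1 []))).getD 3, stage, reason, advice)
    else if PySem.Chars.startswith line ("STAGE:".toList) then
      (status, warmth, (PySem.Int.ofChars? (PySem.Chars.strip ((PySem.Chars.splitOnMax line [':'] 1).getD 1 []))).getD 0, reason, advice)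
    else if PySem.Chars.startswith line ("REASON:".toList) then
      (status, warmth, stage, PySem.Chars.strip ((PySem.Chars.splitOnMax line [':'] 1).getD 1 []), advice)
    else if PySem.Chars.startswith line ("ADVICE:".toList) then
      (status, warmth, stage, reason, PySem.Chars.strip ((PySem.Chars.splitOnMax line [':'] 1).getD 1 []))
    else
      (status, warmth, stage, reason, advice)

-- return status, warmth, reason, advice, stage (List Char fields back to String)
def pvFinish (r : List Char × Int × Int × List Char × List Char) : String × Int × String × String × Int :=
  (String.ofList r.1, r.2.1, String.ofList r.2.2.2.1, String.ofList r.2.2.2.2, r.2.2.1)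

def parse_advisor_response_py (response : String) : String × Int × String × String × Int :=
  pvFinish ((PySem.Chars.splitOn (PySem.Chars.strip response.toList) ['\n']).foldl pvStepA ("IN_PROGRESS".toList, 3, 0, [], []))

-- ===== PORT B =====
-- line.split(":", 1)[1].strip()
def pvG (line : List Char) : List Char :=
  PySem.Chars.strip ((PySem.Chars.splitOnMax line [':'] 1).getD 1 [])

-- last_value(key): scan reversed(lines) for the first line starting with key+":"
-- (find? on the reversed list IS the for-loop over reversed(lines) with early return)
def pvLastVal (lines : List (List Char)) (key : List Char) : Option (List Char) :=
  (lines.reverse.find? (fun line => PySem.Chars.startswith line (key ++ [':']))).map pvG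

-- last_int(key, default)
def pvLastInt (lines : List (List Char)) (key : List Char) (default : Int) : Int :=
  match pvLastVal lines key with
  | none => default
  | some v => (PySem.Int.ofChars? v).getD default

-- the tuple Source B returns, from the stripped lines
def pvBOf (lines : List (List Char)) : String × Int × String × String × Int :=
  ( String.ofList ((pvLastVal lines ("STATUS".toList)).getD ("IN_PROGRESS".toList)),
    pvLastInt lines ("WARMTH".toList) 3,
    String.ofList ((pvLastVal lines ("REASON".toList)).getD []),
    String.ofList ((pvLastVal lines ("ADVICE".toList)).getD []),
    pvLastInt lines ("STAGE".toList) 0 )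

def parse_advisor_response_py_alt (response : String) : String × Int × String × String × Int :=
  pvBOf ((PySem.Chars.splitOn (PySem.Chars.strip response.toList) ['\n']).map PySem.Chars.strip)

-- ===== PRECONDITION & SPEC =====
def Spec_parse_advisor_response_py (response : String) (out : String × Int × String × String × Int) : Prop := out = parse_advisor_response_py_alt response
instance (response : String) (out : String × Int × String × String × Int) : Decidable (Spec_parse_advisor_response_py response out) := by unfold Spec_parse_advisor_response_py; infer_instance

-- ===== CLAIM (what is proved, stated in full; the proofs are below) =====
def Claim_equal_parse_advisor_response_py : Prop := ∀ (response : String), Dom_parse_advisor_response_py response → Spec_parse_advisor_response_py response (parse_advisor_response_py response)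

-- ===== LEMMAS AND PROOFS =====

-- two incomparable prefixes cannot both start the same list
theorem pv_excl {t a b : List Char} (h : PySem.Chars.startswith t a = true)
    (hab : ¬ a <+: b) (hba : ¬ b <+: a) : PySem.Chars.startswith t b = false := by
  rw [← Bool.not_eq_true]; intro hb
  rcases List.prefix_or_prefix_of_prefix ((PySem.Chars.startswith_iff _ _).1 h)
      ((PySem.Chars.startswith_iff _ _).1 hb) with h1 | h1
  exacts [hab h1, hba h1]

-- one iteration of A acts on the five fields independently (the elif chain's
-- guards are mutually exclusive, since no two key-prefixes extend each other)
theorem pvStepA_eq (s : List Char × Int × Int × List Char × List Char) (l : List Char) :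
    pvStepA s l =
      ( if PySem.Chars.startswith (PySem.Chars.strip l) (['S','T','A','T','U','S',':']) then pvG (PySem.Chars.strip l) else s.1,
        if PySem.Chars.startswith (PySem.Chars.strip l) (['W','A','R','M','T','H',':']) then (PySem.Int.ofChars? (pvG (PySem.Chars.strip l))).getD 3 else s.2.1,
        if PySem.Chars.startswith (PySem.Chars.strip l) (['S','T','A','G','E',':']) then (PySem.Int.ofChars? (pvG (PySem.Chars.strip l))).getD 0 else s.2.2.1,
        if PySem.Chars.startswith (PySem.Chars.strip l) (['R','E','A','S','O','N',':']) then pvG (PySem.Chars.strip l) else s.2.2.2.1,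
        if PySem.Chars.startswith (PySem.Chars.strip l) (['A','D','V','I','C','E',':']) then pvG (PySem.Chars.strip l) else s.2.2.2.2 ) := by
  obtain ⟨a, b, c, d, e⟩ := s
  simp only [pvStepA, pvG]
  by_cases h1 : PySem.Chars.startswith (PySem.Chars.strip l) (['S','T','A','T','U','S',':'])
  · have h2 : PySem.Chars.startswith (PySem.Chars.strip l) (['W','A','R','M','T','H',':']) = false := pv_excl h1 (by decide) (by decide)
    have h3 : PySem.Chars.startswith (PySem.Chars.strip l) (['S','T','A','G','E',':']) = false := pv_excl h1 (by decide) (by decide)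
    have h4 : PySem.Chars.startswith (PySem.Chars.strip l) (['R','E','A','S','O','N',':']) = false := pv_excl h1 (by decide) (by decide)
    have h5 : PySem.Chars.startswith (PySem.Chars.strip l) (['A','D','V','I','C','E',':']) = false := pv_excl h1 (by decide) (by decide)
    simp [h1, h2, h3, h4, h5]
  · by_cases h2 : PySem.Chars.startswith (PySem.Chars.strip l) (['W','A','R','M','T','H',':'])
    · have h3 : PySem.Chars.startswith (PySem.Chars.strip l) (['S','T','A','G','E',':']) = false := pv_excl h2 (by decide) (by decide)
      have h4 : PySem.Chars.startswith (PySem.Chars.strip l) (['R','E','A','S','O','N',':']) = false := pv_excl h2 (by decide) (by decide)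
      have h5 : PySem.Chars.startswith (PySem.Chars.strip l) (['A','D','V','I','C','E',':']) = false := pv_excl h2 (by decide) (by decide)
      simp [h1, h2, h3, h4, h5]
    · by_cases h3 : PySem.Chars.startswith (PySem.Chars.strip l) (['S','T','A','G','E',':'])
      · have h4 : PySem.Chars.startswith (PySem.Chars.strip l) (['R','E','A','S','O','N',':']) = false := pv_excl h3 (by decide) (by decide)
        have h5 : PySem.Chars.startswith (PySem.Chars.strip l) (['A','D','V','I','C','E',':']) = false := pv_excl h3 (by decide) (by decide)
        simp [h1, h2, h3, h4, h5]
      · by_cases h4 : PySem.Chars.startswith (PySem.Chars.strip l) (['R','E','A','S','O','N',':'])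
        · have h5 : PySem.Chars.startswith (PySem.Chars.strip l) (['A','D','V','I','C','E',':']) = false := pv_excl h4 (by decide) (by decide)
          simp [h1, h2, h3, h4, h5]
        · by_cases h5 : PySem.Chars.startswith (PySem.Chars.strip l) (['A','D','V','I','C','E',':']) <;> simp [h1, h2, h3, h4, h5]

-- peeling one (already appended-at-front) line off a backward search
theorem pvLastVal_cons (t : List Char) (rest : List (List Char)) (key : List Char) :
    pvLastVal (t :: rest) key =
      match pvLastVal rest key with
      | some v => some v
      | none => if PySem.Chars.startswith t (key ++ [':']) then some (pvG t) else none := by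
  unfold pvLastVal
  rw [List.reverse_cons, List.find?_append]
  cases h : rest.reverse.find? (fun line => PySem.Chars.startswith line (key ++ [':'])) with
  | some v => simp
  | none =>
    by_cases hs : PySem.Chars.startswith t (key ++ [':']) <;> simp [hs, List.find?]

-- the forward fold of A equals the five independent backward searches of B,
-- with the start state's components as the "field absent" fallbacks
theorem pv_fold (ls : List (List Char)) :
    ∀ s : List Char × Int × Int × List Char × List Char,
    ls.foldl pvStepA s =
      ( (match pvLastVal (ls.map PySem.Chars.strip) (['S','T','A','T','U','S']) with
         | some v => v | none => s.1),
        (match pvLastVal (ls.map PySem.Chars.strip) (['W','A','R','M','T','H']) with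
         | some v => (PySem.Int.ofChars? v).getD 3 | none => s.2.1),
        (match pvLastVal (ls.map PySem.Chars.strip) (['S','T','A','G','E']) with
         | some v => (PySem.Int.ofChars? v).getD 0 | none => s.2.2.1),
        (match pvLastVal (ls.map PySem.Chars.strip) (['R','E','A','S','O','N']) with
         | some v => v | none => s.2.2.2.1),
        (match pvLastVal (ls.map PySem.Chars.strip) (['A','D','V','I','C','E']) with
         | some v => v | none => s.2.2.2.2) ) := by
  induction ls with
  | nil => intro s; simp [pvLastVal]
  | cons l ls ih =>
    intro s
    rw [List.foldl_cons, ih (pvStepA s l), pvStepA_eq]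
    simp only [List.map_cons, pvLastVal_cons]
    refine Prod.ext ?_ (Prod.ext ?_ (Prod.ext ?_ (Prod.ext ?_ ?_))) <;> simp only []
    · cases h : pvLastVal (ls.map PySem.Chars.strip) (['S','T','A','T','U','S']) with
      | some v => simp
      | none =>
        by_cases hs : PySem.Chars.startswith (PySem.Chars.strip l) (['S','T','A','T','U','S',':']) <;> simp [hs]
    · cases h : pvLastVal (ls.map PySem.Chars.strip) (['W','A','R','M','T','H']) with
      | some v => simp
      | none =>
        by_cases hs : PySem.Chars.startswith (PySem.Chars.strip l) (['W','A','R','M','T','H',':']) <;> simp [hs]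
    · cases h : pvLastVal (ls.map PySem.Chars.strip) (['S','T','A','G','E']) with
      | some v => simp
      | none =>
        by_cases hs : PySem.Chars.startswith (PySem.Chars.strip l) (['S','T','A','G','E',':']) <;> simp [hs]
    · cases h : pvLastVal (ls.map PySem.Chars.strip) (['R','E','A','S','O','N']) with
      | some v => simp
      | none =>
        by_cases hs : PySem.Chars.startswith (PySem.Chars.strip l) (['R','E','A','S','O','N',':']) <;> simp [hs]
    · cases h : pvLastVal (ls.map PySem.Chars.strip) (['A','D','V','I','C','E']) with
      | some v => simp
      | none =>
        by_cases hs : PySem.Chars.startswith (PySem.Chars.strip l) (['A','D','V','I','C','E',':']) <;> simp [hs]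

-- ===== VERDICT (by name: the statement is the Claim_ definition above) =====
theorem parse_advisor_response_py_spec : Claim_equal_parse_advisor_response_py := by
  intro response _
  unfold Spec_parse_advisor_response_py parse_advisor_response_py parse_advisor_response_py_alt
  rw [pv_fold]
  unfold pvFinish pvBOf
  refine Prod.ext ?_ (Prod.ext ?_ (Prod.ext ?_ (Prod.ext ?_ ?_))) <;> simp only []
  · cases h : pvLastVal ((PySem.Chars.splitOn (PySem.Chars.strip response.toList) ['\n']).map PySem.Chars.strip) (['S','T','A','T','U','S']) <;> simp [h]
  · cases h : pvLastVal ((PySem.Chars.splitOn (PySem.Chars.strip response.toList) ['\n']).map PySem.Chars.strip) (['W','A','R','M','T','H']) <;> simp [pvLastInt, h]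
  · cases h : pvLastVal ((PySem.Chars.splitOn (PySem.Chars.strip response.toList) ['\n']).map PySem.Chars.strip) (['R','E','A','S','O','N']) <;> simp [h]
  · cases h : pvLastVal ((PySem.Chars.splitOn (PySem.Chars.strip response.toList) ['\n']).map PySem.Chars.strip) (['A','D','V','I','C','E']) <;> simp [h]
  · cases h : pvLastVal ((PySem.Chars.splitOn (PySem.Chars.strip response.toList) ['\n']).map PySem.Chars.strip) (['S','T','A','G','E']) <;> simp [pvLastInt, h]
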